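-- pv_equiv track=rewrite | github.com/robertpsoane/advent-of-code-21 | day_10.py | get_closing_queue
-- ===== SOURCE A (Python) =====
-- OPENING = {"(":")", "[":"]", "{":"}", "<":">"}
--
-- def get_closing_queue(line, closing_stack):
--     if not line:
--         return closing_stack
--     character = line.pop(0)
--     if character in OPENING:
--         next_close = OPENING[character]
--         closing_stack.append(next_close)
--     elif closing_stack:
--         closing_stack.pop(len(closing_stack ) - 1)
--     return get_closing_queue(line, closing_stack)
-- ===== SOURCE B (Python) =====
-- OPENING = {"(":")", "[":"]", "{":"}", "<":">"}
--
-- def get_closing_queue(line, closing_stack):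
--     stack = list(closing_stack)
--     for ch in line:
--         if ch in OPENING:
--             stack.append(OPENING[ch])
--         elif stack:
--             stack.pop()
--     return stack
-- ===== Notes on version B (the rewrite author's own statement) =====
-- stated objective: simpler
-- what changed: Replaced the recursion that pops line[0] (an O(n) list shift per step, plus Python recursion depth limits) with a single iterative forward loop over line maintaining the stack; return value only (A empties line and mutates closing_stack in place, B does not).
import Mathlib
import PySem

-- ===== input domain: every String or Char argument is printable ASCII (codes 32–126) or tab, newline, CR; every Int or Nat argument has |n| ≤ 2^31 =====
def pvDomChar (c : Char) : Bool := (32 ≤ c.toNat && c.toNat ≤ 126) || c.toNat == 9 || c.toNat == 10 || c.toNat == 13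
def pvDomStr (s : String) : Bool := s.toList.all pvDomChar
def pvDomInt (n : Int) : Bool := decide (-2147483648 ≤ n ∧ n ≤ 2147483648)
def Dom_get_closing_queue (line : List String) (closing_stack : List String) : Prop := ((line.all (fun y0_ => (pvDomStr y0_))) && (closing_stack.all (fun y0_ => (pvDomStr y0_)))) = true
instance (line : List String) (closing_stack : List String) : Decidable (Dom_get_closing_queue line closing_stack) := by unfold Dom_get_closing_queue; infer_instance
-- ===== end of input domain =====

-- B replaces A's recursion on line.pop(0) by one forward loop over line maintaining the
-- stack (simpler, no recursion); equivalence is about the RETURN value only: Python A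
-- empties `line` and mutates `closing_stack` in place, B does not.

-- ===== PORT A =====
def pvOPENING : PySem.Dict String String :=
  PySem.Dict.ofList [("(", ")"), ("[", "]"), ("{", "}"), ("<", ">")]

-- literal port of A's recursion: pop line[0]; if opener, append its closer;
-- elif stack nonempty, pop its last element (index len-1); recurse.
def get_closing_queue (line : List String) (closing_stack : List String) : List String :=
  match line with
  | [] => closing_stack
  | character :: rest =>
    match PySem.Dict.get? pvOPENING character with
    | some next_close => get_closing_queue rest (closing_stack ++ [next_close])
    | none =>
      if closing_stack ≠ [] then
        get_closing_queue rest closing_stack.dropLast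
      else
        get_closing_queue rest closing_stack

-- ===== PORT B =====
-- literal port of B: a single foldl over line carrying the stack.
def get_closing_queue_alt (line : List String) (closing_stack : List String) : List String :=
  line.foldl
    (fun stack ch =>
      match PySem.Dict.get? pvOPENING ch with
      | some c => stack ++ [c]
      | none => if stack ≠ [] then stack.dropLast else stack)
    closing_stack

-- ===== PRECONDITION & SPEC =====
def Spec_get_closing_queue (line : List String) (closing_stack : List String) (out : List String) : Prop := out = get_closing_queue_alt line closing_stack
instance (line : List String) (closing_stack : List String) (out : List String) : Decidable (Spec_get_closing_queue line closing_stack out) := by unfold Spec_get_closing_queue; infer_instance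

-- ===== CLAIM (what is proved, stated in full; the proofs are below) =====
def Claim_equal_get_closing_queue : Prop := ∀ (line : List String) (closing_stack : List String), Dom_get_closing_queue line closing_stack → Spec_get_closing_queue line closing_stack (get_closing_queue line closing_stack)

-- ===== LEMMAS AND PROOFS =====
theorem get_closing_queue_eq_alt (line : List String) (closing_stack : List String) :
    get_closing_queue line closing_stack = get_closing_queue_alt line closing_stack := by
  induction line generalizing closing_stack with
  | nil => rfl
  | cons character rest ih =>
    unfold get_closing_queue get_closing_queue_alt
    simp only [List.foldl_cons]
    cases h : PySem.Dict.get? pvOPENING character with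
    | some c => simpa [h, get_closing_queue_alt] using ih (closing_stack ++ [c])
    | none =>
      by_cases hcs : closing_stack = [] <;>
        simp [hcs, get_closing_queue_alt, ih]

-- ===== VERDICT (by name: the statement is the Claim_ definition above) =====
theorem get_closing_queue_spec : Claim_equal_get_closing_queue := by
  intro line closing_stack _
  exact get_closing_queue_eq_alt line closing_stack
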